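-- pv_equiv track=rewrite | github.com/yeverycode/Agent | tools/parser.py | select_candidate_files
-- ===== SOURCE A (Python) =====
-- from typing import Any, Dict, List
--
-- PRIORITY_FILE_KEYWORDS = [
--     "readme.md",
--     "package.json",
--     "requirements.txt",
--     "pyproject.toml",
--     "main.py",
--     "app.py",
--     "server.py",
--     "server.js",
--     "server.ts",
--     "index.js",
--     "index.ts",
--     "app.tsx",
--     "app.jsx",
--     "main.ts",
--     "main.tsx",
--     "routes.py",
--     "urls.py",
--     "settings.py",
-- ]
--
-- def select_candidate_files(tree_paths: List[str], max_files: int = 8) -> List[str]: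
--     """
--     분석에 우선적으로 사용할 핵심 파일 후보를 규칙 기반으로 선택한다.
--     """
--     selected: List[str] = []
--     lower_map = {p.lower(): p for p in tree_paths}
--
--     # 1차: 우선순위 높은 파일
--     for keyword in PRIORITY_FILE_KEYWORDS:
--         for path_lower, original in lower_map.items():
--             if path_lower.endswith(keyword) and original not in selected:
--                 selected.append(original)
--                 if len(selected) >= max_files:
--                     return selected
--
--     # 2차: 주요 디렉토리 안의 대표 코드 파일
--     for path in tree_paths:
--         path_lower = path.lower()
--         if path in selected:
--             continue
--
--         if (
--             any(folder in path_lower for folder in ["src/", "app/", "pages/", "components/", "backend/", "frontend/"])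
--             and path_lower.endswith((".py", ".js", ".ts", ".tsx", ".jsx"))
--         ):
--             selected.append(path)
--             if len(selected) >= max_files:
--                 return selected
--
--     return selected
-- ===== SOURCE B (Python) =====
-- PRIORITY_FILE_KEYWORDS = [
--     "readme.md",
--     "package.json",
--     "requirements.txt",
--     "pyproject.toml",
--     "main.py",
--     "app.py",
--     "server.py",
--     "server.js",
--     "server.ts",
--     "index.js",
--     "index.ts",
--     "app.tsx",
--     "app.jsx",
--     "main.ts",
--     "main.tsx",
--     "routes.py",
--     "urls.py",
--     "settings.py",
-- ]
--
-- CODE_FOLDERS = ["src/", "app/", "pages/", "components/", "backend/", "frontend/"]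
-- CODE_EXTS = (".py", ".js", ".ts", ".tsx", ".jsx")
--
--
-- def select_candidate_files(tree_paths, max_files=8):
--     # One pass over the deduplicated paths: bucket each by the first priority
--     # keyword its lowercase form ends with, then concatenate the buckets in
--     # keyword order (a counting/bucket sort instead of rescanning per keyword).
--     lower_map = {p.lower(): p for p in tree_paths}
--     buckets = [[] for _ in PRIORITY_FILE_KEYWORDS]
--     for path_lower, original in lower_map.items():
--         for i, keyword in enumerate(PRIORITY_FILE_KEYWORDS):
--             if path_lower.endswith(keyword):
--                 buckets[i].append(original)
--                 break
--     phase1 = [p for bucket in buckets for p in bucket]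
--
--     # Representative code files in well-known directories, deduplicated.
--     extra = []
--     for p in tree_paths:
--         pl = p.lower()
--         if p in phase1 or p in extra:
--             continue
--         if any(folder in pl for folder in CODE_FOLDERS) and pl.endswith(CODE_EXTS):
--             extra.append(p)
--
--     # Single cap applied over the whole candidate stream.
--     selected = []
--     for p in phase1 + extra:
--         selected.append(p)
--         if len(selected) >= max_files:
--             break
--     return selected
-- ===== Notes on version B (the rewrite author's own statement) =====
-- stated objective: alternative
-- what changed: A rescans the whole lower_map once per priority keyword with a membership-guard dedup and checks the max_files cap after every append in both phases; B makes one bucketing pass over lower_map assigning each path to its first matching keyword, flattens the buckets in keyword order, collects the phase-2 directory/extension files separately, and applies the cap in a single loop over the concatenated candidate stream.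
import Mathlib
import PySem

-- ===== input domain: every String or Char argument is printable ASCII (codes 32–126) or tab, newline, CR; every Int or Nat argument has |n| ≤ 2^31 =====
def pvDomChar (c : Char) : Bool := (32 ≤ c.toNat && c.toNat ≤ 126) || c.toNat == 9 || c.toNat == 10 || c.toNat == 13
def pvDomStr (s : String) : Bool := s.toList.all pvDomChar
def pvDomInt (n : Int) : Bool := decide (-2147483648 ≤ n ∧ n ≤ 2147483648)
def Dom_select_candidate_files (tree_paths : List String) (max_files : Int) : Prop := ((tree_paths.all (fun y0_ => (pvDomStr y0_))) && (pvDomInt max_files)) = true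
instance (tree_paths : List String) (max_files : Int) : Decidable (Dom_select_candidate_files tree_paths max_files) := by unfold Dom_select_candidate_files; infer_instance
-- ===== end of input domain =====

-- B replaces A's per-keyword rescans of the dict (with a membership-guard dedup and the
-- cap check interleaved in both phases) by one bucket pass over the dict assigning each
-- path to its first matching keyword, then a single cap loop over the concatenated
-- candidate stream (objective: alternative — same cost, different algorithm).

def pvKeywords : List String :=
  ["readme.md", "package.json", "requirements.txt", "pyproject.toml", "main.py",
   "app.py", "server.py", "server.js", "server.ts", "index.js", "index.ts",
   "app.tsx", "app.jsx", "main.ts", "main.tsx", "routes.py", "urls.py", "settings.py"]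

def pvFolders : List String := ["src/", "app/", "pages/", "components/", "backend/", "frontend/"]

def pvExts : List String := [".py", ".js", ".ts", ".tsx", ".jsx"]

-- 'lower_map = {p.lower(): p for p in tree_paths}' (the identical line opens both A and B)
def pvLowerMap (tree_paths : List String) : PySem.Dict String String :=
  tree_paths.foldl (fun d p => d.insert (PySem.Str.lower p) p) PySem.Dict.empty

-- ===== PORT A =====
-- inner 'for path_lower, original in lower_map.items():' of phase 1
-- (Sum.inl = the early 'return selected', Sum.inr = loop finished)
def aInner (max_files : Int) (kw : String) : List (String × String) → List String → Sum (List String) (List String)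
  | [], sel => .inr sel
  | (pl, orig) :: rest, sel =>
    if PySem.Str.endswith pl kw = true ∧ orig ∉ sel then
      if max_files ≤ ((sel ++ [orig]).length : Int) then .inl (sel ++ [orig])
      else aInner max_files kw rest (sel ++ [orig])
    else aInner max_files kw rest sel

-- outer 'for keyword in PRIORITY_FILE_KEYWORDS:' of phase 1
def aOuter (max_files : Int) (items : List (String × String)) : List String → List String → Sum (List String) (List String)
  | [], sel => .inr sel
  | kw :: kws, sel =>
    match aInner max_files kw items sel with
    | .inl r => .inl r
    | .inr sel' => aOuter max_files items kws sel'

-- phase 2: 'for path in tree_paths: …'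
def aPhase2 (max_files : Int) : List String → List String → List String
  | [], sel => sel
  | p :: ps, sel =>
    if p ∈ sel then aPhase2 max_files ps sel
    else if (pvFolders.any fun f => PySem.Str.isIn f (PySem.Str.lower p)) = true ∧ (pvExts.any fun e => PySem.Str.endswith (PySem.Str.lower p) e) = true then
      if max_files ≤ ((sel ++ [p]).length : Int) then sel ++ [p]
      else aPhase2 max_files ps (sel ++ [p])
    else aPhase2 max_files ps sel

def select_candidate_files (tree_paths : List String) (max_files : Int) : List String :=
  match aOuter max_files (pvLowerMap tree_paths).items pvKeywords [] with
  | .inl r => r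
  | .inr sel => aPhase2 max_files tree_paths sel

-- ===== PORT B =====
-- 'for i, keyword in enumerate(PRIORITY_FILE_KEYWORDS): … break' — append orig to the
-- bucket of the first matching keyword (i is the running enumerate counter)
def bPlace (pl orig : String) : Nat → List String → List (List String) → List (List String)
  | _, [], bs => bs
  | i, kw :: kws, bs =>
    if PySem.Str.endswith pl kw = true then bs.set i (bs.getD i [] ++ [orig])
    else bPlace pl orig (i + 1) kws bs

-- the bucket-filling pass over lower_map.items()
def bBuckets (items : List (String × String)) : List (List String) :=
  items.foldl (fun bs e => bPlace e.1 e.2 0 pvKeywords bs) (pvKeywords.map fun _ => [])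

-- phase-2 collection loop of Source B ('extra')
def bExtra (phase1 : List String) : List String → List String → List String
  | [], extra => extra
  | p :: ps, extra =>
    if p ∈ phase1 ∨ p ∈ extra then bExtra phase1 ps extra
    else if (pvFolders.any fun f => PySem.Str.isIn f (PySem.Str.lower p)) = true ∧ (pvExts.any fun e => PySem.Str.endswith (PySem.Str.lower p) e) = true then
      bExtra phase1 ps (extra ++ [p])
    else bExtra phase1 ps extra

-- final cap loop of Source B
def bCap (max_files : Int) : List String → List String → List String
  | [], sel => sel
  | p :: ps, sel =>
    if max_files ≤ ((sel ++ [p]).length : Int) then sel ++ [p]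
    else bCap max_files ps (sel ++ [p])

def select_candidate_files_alt (tree_paths : List String) (max_files : Int) : List String :=
  bCap max_files
    ((bBuckets (pvLowerMap tree_paths).items).flatten
      ++ bExtra ((bBuckets (pvLowerMap tree_paths).items).flatten) tree_paths [])
    []

-- ===== PRECONDITION & SPEC =====
def Spec_select_candidate_files (tree_paths : List String) (max_files : Int) (out : List String) : Prop := out = select_candidate_files_alt tree_paths max_files
instance (tree_paths : List String) (max_files : Int) (out : List String) : Decidable (Spec_select_candidate_files tree_paths max_files out) := by unfold Spec_select_candidate_files; infer_instance

-- ===== CLAIM (what is proved, stated in full; the proofs are below) =====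
def Claim_equal_select_candidate_files : Prop := ∀ (tree_paths : List String) (max_files : Int), Dom_select_candidate_files tree_paths max_files → Spec_select_candidate_files tree_paths max_files (select_candidate_files tree_paths max_files)

-- ===== LEMMAS AND PROOFS =====

-- loop skeleton shared by every capped append loop: append, stop once the cap is reached
def capS (m : Int) : List String → List String → Sum (List String) (List String)
  | sel, [] => .inr sel
  | sel, x :: xs =>
    if m ≤ ((sel ++ [x]).length : Int) then .inl (sel ++ [x]) else capS m (sel ++ [x]) xs

lemma capS_inr (m : Int) : ∀ (xs sel s : List String), capS m sel xs = .inr s → s = sel ++ xs := by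
  intro xs
  induction xs with
  | nil => intro sel s h; simp only [capS] at h; cases h; simp
  | cons x xs ih =>
    intro sel s h
    simp only [capS] at h
    by_cases hc : m ≤ ((sel ++ [x]).length : Int)
    · rw [if_pos hc] at h; cases h
    · rw [if_neg hc] at h
      have := ih (sel ++ [x]) s h
      simp [this]

lemma capS_append (m : Int) : ∀ (xs ys sel : List String),
    capS m sel (xs ++ ys) = match capS m sel xs with
      | .inl r => .inl r
      | .inr s => capS m s ys := by
  intro xs
  induction xs with
  | nil => intro ys sel; simp [capS]
  | cons x xs ih =>
    intro ys sel
    simp only [List.cons_append, capS]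
    by_cases hc : m ≤ ((sel ++ [x]).length : Int)
    · rw [if_pos hc, if_pos hc]
    · rw [if_neg hc, if_neg hc]
      exact ih ys (sel ++ [x])

lemma bCap_eq_capS (m : Int) : ∀ (xs sel : List String),
    bCap m xs sel = match capS m sel xs with | .inl r => r | .inr s => s := by
  intro xs
  induction xs with
  | nil => intro sel; simp [bCap, capS]
  | cons x xs ih =>
    intro sel
    simp only [bCap, capS]
    by_cases hc : m ≤ ((sel ++ [x]).length : Int)
    · rw [if_pos hc, if_pos hc]
    · rw [if_neg hc, if_neg hc]
      exact ih (sel ++ [x])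

-- the elements A's phase-1 inner loop appends (uncapped)
def d1 (kw : String) : List (String × String) → List String → List String
  | [], _ => []
  | (pl, o) :: rest, sel =>
    if PySem.Str.endswith pl kw = true ∧ o ∉ sel then o :: d1 kw rest (sel ++ [o])
    else d1 kw rest sel

-- the elements A's phase-1 outer loop appends (uncapped)
def dOut (items : List (String × String)) : List String → List String → List String
  | [], _ => []
  | kw :: kws, sel => d1 kw items sel ++ dOut items kws (sel ++ d1 kw items sel)

-- the elements A's phase-2 loop appends (uncapped)
def d2 : List String → List String → List String
  | [], _ => []
  | p :: ps, sel =>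
    if p ∈ sel then d2 ps sel
    else if (pvFolders.any fun f => PySem.Str.isIn f (PySem.Str.lower p)) = true ∧ (pvExts.any fun e => PySem.Str.endswith (PySem.Str.lower p) e) = true then
      p :: d2 ps (sel ++ [p])
    else d2 ps sel

lemma aInner_eq (m : Int) (kw : String) : ∀ (rest : List (String × String)) (sel : List String),
    aInner m kw rest sel = capS m sel (d1 kw rest sel) := by
  intro rest
  induction rest with
  | nil => intro sel; simp [aInner, d1, capS]
  | cons e rest ih =>
    obtain ⟨pl, o⟩ := e
    intro sel
    simp only [aInner, d1]
    by_cases hg : PySem.Str.endswith pl kw = true ∧ o ∉ sel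
    · rw [if_pos hg, if_pos hg]
      simp only [capS]
      by_cases hc : m ≤ ((sel ++ [o]).length : Int)
      · rw [if_pos hc, if_pos hc]
      · rw [if_neg hc, if_neg hc]
        exact ih (sel ++ [o])
    · rw [if_neg hg, if_neg hg]
      exact ih sel

lemma aOuter_eq (m : Int) (items : List (String × String)) :
    ∀ (kws sel : List String),
    aOuter m items kws sel = capS m sel (dOut items kws sel) := by
  intro kws
  induction kws with
  | nil => intro sel; simp [aOuter, dOut, capS]
  | cons kw kws ih =>
    intro sel
    simp only [aOuter, dOut]
    rw [aInner_eq, capS_append]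
    cases h : capS m sel (d1 kw items sel) with
    | inl r => rfl
    | inr s =>
      have hs := capS_inr m (d1 kw items sel) sel s h
      subst hs
      exact ih (sel ++ d1 kw items sel)

lemma aPhase2_eq (m : Int) : ∀ (ps sel : List String),
    aPhase2 m ps sel = bCap m (d2 ps sel) sel := by
  intro ps
  induction ps with
  | nil => intro sel; simp [aPhase2, d2, bCap]
  | cons p ps ih =>
    intro sel
    simp only [aPhase2, d2]
    by_cases h1 : p ∈ sel
    · rw [if_pos h1, if_pos h1]
      exact ih sel
    · rw [if_neg h1, if_neg h1]
      by_cases h2 : (pvFolders.any fun f => PySem.Str.isIn f (PySem.Str.lower p)) = true ∧ (pvExts.any fun e => PySem.Str.endswith (PySem.Str.lower p) e) = true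
      · rw [if_pos h2, if_pos h2]
        simp only [bCap]
        by_cases hc : m ≤ ((sel ++ [p]).length : Int)
        · rw [if_pos hc, if_pos hc]
        · rw [if_neg hc, if_neg hc]
          exact ih (sel ++ [p])
      · rw [if_neg h2, if_neg h2]
        exact ih sel

lemma bExtra_eq (ph : List String) : ∀ (ps extra : List String),
    bExtra ph ps extra = extra ++ d2 ps (ph ++ extra) := by
  intro ps
  induction ps with
  | nil => intro extra; simp [bExtra, d2]
  | cons p ps ih =>
    intro extra
    simp only [bExtra, d2]
    by_cases h1 : p ∈ ph ++ extra
    · rw [if_pos (by simpa [List.mem_append] using h1), if_pos h1]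
      exact ih extra
    · rw [if_neg (by simpa [List.mem_append] using h1), if_neg h1]
      by_cases h2 : (pvFolders.any fun f => PySem.Str.isIn f (PySem.Str.lower p)) = true ∧ (pvExts.any fun e => PySem.Str.endswith (PySem.Str.lower p) e) = true
      · rw [if_pos h2, if_pos h2]
        rw [ih (extra ++ [p])]
        simp [List.append_assoc]
      · rw [if_neg h2, if_neg h2]
        exact ih extra

-- first priority keyword the lowercase path ends with
def fm (pl : String) : Option Nat := pvKeywords.findIdx? (fun kw => PySem.Str.endswith pl kw)

-- the bucket of keyword j
def grp (items : List (String × String)) (j : Nat) : List String :=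
  (items.filter (fun e => decide (fm e.1 = some j))).map Prod.snd

lemma d1_filter (kw : String) : ∀ (items : List (String × String)) (sel : List String),
    (items.map Prod.snd).Nodup →
    d1 kw items sel = (items.filter (fun e => decide (PySem.Str.endswith e.1 kw = true ∧ e.2 ∉ sel))).map Prod.snd := by
  intro items
  induction items with
  | nil => intro sel _; simp [d1]
  | cons e items ih =>
    obtain ⟨pl, o⟩ := e
    intro sel hnd
    have hnd' : (items.map Prod.snd).Nodup := (List.nodup_cons.mp (by simpa using hnd)).2
    have ho : o ∉ items.map Prod.snd := (List.nodup_cons.mp (by simpa using hnd)).1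
    simp only [d1]
    by_cases hg : PySem.Str.endswith pl kw = true ∧ o ∉ sel
    · rw [if_pos hg]
      rw [ih (sel ++ [o]) hnd']
      have hcg : items.filter (fun e' => decide (PySem.Str.endswith e'.1 kw = true ∧ e'.2 ∉ sel ++ [o]))
          = items.filter (fun e' => decide (PySem.Str.endswith e'.1 kw = true ∧ e'.2 ∉ sel)) := by
        apply List.filter_congr
        intro e' he'
        have hne : e'.2 ≠ o := by
          intro hq
          exact ho (hq ▸ List.mem_map_of_mem he')
        simp [List.mem_append, hne]
      rw [hcg, List.filter_cons]
      rw [if_pos (show (decide (PySem.Str.endswith (pl, o).1 kw = true ∧ (pl, o).2 ∉ sel)) = true by simpa [hg.2] using hg.1)]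
      simp
    · rw [if_neg hg]
      rw [ih sel hnd']
      rw [List.filter_cons]
      rw [if_neg (show ¬ (decide (PySem.Str.endswith (pl, o).1 kw = true ∧ (pl, o).2 ∉ sel)) = true by simpa using hg)]

lemma fm_of_match (pl : String) (j : Nat) (hj : j < pvKeywords.length)
    (h : PySem.Str.endswith pl pvKeywords[j] = true) :
    ∃ t, fm pl = some t ∧ t ≤ j := by
  cases hf : fm pl with
  | none =>
    exfalso
    unfold fm at hf
    have := List.findIdx?_eq_none_iff.mp hf pvKeywords[j] (List.getElem_mem hj)
    rw [h] at this
    cases this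
  | some t =>
    refine ⟨t, rfl, ?_⟩
    unfold fm at hf
    obtain ⟨ht, hpt, hmin⟩ := List.findIdx?_eq_some_iff_getElem.mp hf
    by_contra hlt
    have hjt : j < t := by omega
    exact hmin j hjt h

lemma fm_some_match (pl : String) (t : Nat) (hf : fm pl = some t) :
    ∃ h : t < pvKeywords.length, PySem.Str.endswith pl pvKeywords[t] = true := by
  unfold fm at hf
  obtain ⟨h, h1, _⟩ := List.findIdx?_eq_some_iff_getElem.mp hf
  exact ⟨h, h1⟩

lemma inj_snd {items : List (String × String)} (hsnd : (items.map Prod.snd).Nodup)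
    {e e' : String × String} (he : e ∈ items) (he' : e' ∈ items) (h : e.2 = e'.2) : e = e' :=
  List.inj_on_of_nodup_map hsnd he he' h

lemma dOut_suffix (items : List (String × String)) (hsnd : (items.map Prod.snd).Nodup) :
    ∀ (kws : List String) (j : Nat) (sel : List String),
    pvKeywords.drop j = kws →
    (∀ e ∈ items, (e.2 ∈ sel ↔ ∃ t, fm e.1 = some t ∧ t < j)) →
    dOut items kws sel = (List.range' j (pvKeywords.length - j)).flatMap (grp items) := by
  intro kws
  induction kws with
  | nil =>
    intro j sel hdrop _
    have hj : pvKeywords.length ≤ j := List.drop_eq_nil_iff.mp hdrop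
    simp [dOut, Nat.sub_eq_zero_of_le hj]
  | cons kw kws ih =>
    intro j sel hdrop hinv
    have hj : j < pvKeywords.length := by
      by_contra hge
      rw [List.drop_eq_nil_iff.mpr (Nat.le_of_not_lt hge)] at hdrop
      cases hdrop
    have hkw : pvKeywords[j] = kw := by
      have h0 : (pvKeywords.drop j)[0]? = some kw := by rw [hdrop]; rfl
      rw [List.getElem?_drop, Nat.add_zero, List.getElem?_eq_getElem hj] at h0
      exact Option.some.inj h0
    have hdrop' : pvKeywords.drop (j + 1) = kws := by
      rw [← List.tail_drop, hdrop]
      rfl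
    -- the inner pass over this keyword collects exactly bucket j
    have hd1 : d1 kw items sel = grp items j := by
      rw [d1_filter kw items sel hsnd]
      unfold grp
      congr 1
      apply List.filter_congr
      intro e he
      rw [decide_eq_decide]
      constructor
      · rintro ⟨hm, hout⟩
        obtain ⟨t, hft, htj⟩ := fm_of_match e.1 j hj (by rwa [hkw])
        rcases Nat.lt_or_ge t j with hlt | hge
        · exact absurd ((hinv e he).mpr ⟨t, hft, hlt⟩) hout
        · have : t = j := by omega
          rwa [this] at hft
      · intro hfm
        obtain ⟨ht, h1⟩ := fm_some_match e.1 j hfm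
        refine ⟨by rwa [hkw] at h1, fun hin => ?_⟩
        obtain ⟨t, hft, htj⟩ := (hinv e he).mp hin
        rw [hfm] at hft
        cases hft
        omega
    -- membership in bucket j is exactly 'fm = some j'
    have hgrp_mem : ∀ e ∈ items, (e.2 ∈ grp items j ↔ fm e.1 = some j) := by
      intro e he
      constructor
      · intro hmem
        unfold grp at hmem
        obtain ⟨e', he'f, he'2⟩ := List.mem_map.mp hmem
        have he'i : e' ∈ items := List.mem_of_mem_filter he'f
        have hp := List.of_mem_filter he'f
        have : e' = e := inj_snd hsnd he'i he he'2
        subst this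
        simpa using hp
      · intro hfm
        unfold grp
        apply List.mem_map_of_mem
        exact List.mem_filter.mpr ⟨he, by simp [hfm]⟩
    have hinv' : ∀ e ∈ items, (e.2 ∈ sel ++ grp items j ↔ ∃ t, fm e.1 = some t ∧ t < j + 1) := by
      intro e he
      rw [List.mem_append, hinv e he, hgrp_mem e he]
      constructor
      · rintro (⟨t, hft, htj⟩ | hfm)
        · exact ⟨t, hft, by omega⟩
        · exact ⟨j, hfm, by omega⟩
      · rintro ⟨t, hft, htj⟩
        rcases Nat.lt_or_ge t j with hlt | hge
        · exact Or.inl ⟨t, hft, hlt⟩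
        · have : t = j := by omega
          subst this
          exact Or.inr hft
    simp only [dOut]
    rw [hd1, ih (j + 1) (sel ++ grp items j) hdrop' hinv']
    have hlen : pvKeywords.length - j = (pvKeywords.length - (j + 1)) + 1 := by omega
    rw [hlen, List.range'_succ]
    simp [List.flatMap_cons]

lemma getD_set_self (bs : List (List String)) (t : Nat) (v : List String) (ht : t < bs.length) :
    (bs.set t v).getD t [] = v := by
  simp [List.getD_eq_getElem?_getD, List.getElem?_set_self ht]

lemma getD_set_ne (bs : List (List String)) (t j : Nat) (v : List String) (h : t ≠ j) :
    (bs.set t v).getD j [] = bs.getD j [] := by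
  simp [List.getD_eq_getElem?_getD, List.getElem?_set_ne h]

lemma bPlace_eq (pl o : String) : ∀ (kws : List String) (i : Nat) (bs : List (List String)),
    bPlace pl o i kws bs = match kws.findIdx? (fun kw => PySem.Str.endswith pl kw) with
      | none => bs
      | some t => bs.set (i + t) (bs.getD (i + t) [] ++ [o]) := by
  intro kws
  induction kws with
  | nil => intro i bs; simp [bPlace]
  | cons kw kws ih =>
    intro i bs
    simp only [bPlace, List.findIdx?_cons]
    by_cases h : PySem.Str.endswith pl kw = true
    · simp only [if_pos h]
      simp
    · simp only [if_neg h]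
      rw [ih (i + 1) bs]
      cases hfi : kws.findIdx? (fun kw => PySem.Str.endswith pl kw) with
      | none => simp
      | some t =>
        simp only [Option.map_some]
        have harith : i + 1 + t = i + (t + 1) := by omega
        rw [harith]

lemma buckets_fold_eq : ∀ (items : List (String × String)) (bs0 : List (List String)),
    bs0.length = pvKeywords.length →
    items.foldl (fun bs e => bPlace e.1 e.2 0 pvKeywords bs) bs0
      = (List.range pvKeywords.length).map (fun j => bs0.getD j [] ++ grp items j) := by
  intro items
  induction items with
  | nil =>
    intro bs0 hlen
    simp only [List.foldl_nil]
    apply List.ext_getElem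
    · simp [hlen]
    · intro k h1 h2
      simp only [List.getElem_map, List.getElem_range]
      have hk : k < bs0.length := by simpa [hlen] using h2
      simp [grp, List.getD_eq_getElem?_getD, List.getElem?_eq_getElem hk]
  | cons e items ih =>
    intro bs0 hlen
    simp only [List.foldl_cons]
    rw [bPlace_eq]
    cases hfm : pvKeywords.findIdx? (fun kw => PySem.Str.endswith e.1 kw) with
    | none =>
      rw [ih bs0 hlen]
      apply List.map_congr_left
      intro j _
      unfold grp
      rw [List.filter_cons]
      have : ¬ (decide (fm e.1 = some j)) = true := by
        unfold fm
        rw [hfm]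
        simp
      rw [if_neg this]
    | some t =>
      have ht : t < pvKeywords.length := by
        obtain ⟨h, _, _⟩ := List.findIdx?_eq_some_iff_getElem.mp hfm
        exact h
      simp only [Nat.zero_add]
      rw [ih _ (by simp [hlen])]
      apply List.map_congr_left
      intro j hj
      by_cases hjt : j = t
      · subst hjt
        rw [getD_set_self bs0 j _ (by omega)]
        unfold grp
        rw [List.filter_cons]
        have : (decide (fm e.1 = some j)) = true := by
          unfold fm
          rw [hfm]
          simp
        rw [if_pos this]
        simp [List.append_assoc]
      · rw [getD_set_ne bs0 t j _ (fun hq => hjt hq.symm)]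
        unfold grp
        rw [List.filter_cons]
        have : ¬ (decide (fm e.1 = some j)) = true := by
          unfold fm
          rw [hfm]
          simp
          omega
        rw [if_neg this]

-- B's phase-1 list is the buckets flattened in keyword order
lemma bBuckets_flatten (items : List (String × String)) :
    (bBuckets items).flatten = (List.range pvKeywords.length).flatMap (grp items) := by
  unfold bBuckets
  rw [buckets_fold_eq items _ (by simp)]
  rw [List.flatMap_def]
  refine congrArg List.flatten (List.map_congr_left ?_)
  intro j hj
  have hjl : j < pvKeywords.length := by simpa using hj
  have hz : (pvKeywords.map fun _ => ([] : List String)).getD j [] = [] := by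
    rw [List.getD_eq_getElem?_getD, List.getElem?_eq_getElem (by simpa using hjl)]
    simp
  rw [hz]
  simp

-- A's phase-1 stream equals B's phase-1 list
lemma dOut_eq_bBuckets (items : List (String × String)) (hsnd : (items.map Prod.snd).Nodup) :
    dOut items pvKeywords [] = (bBuckets items).flatten := by
  rw [bBuckets_flatten]
  rw [List.range_eq_range']
  have := dOut_suffix items hsnd pvKeywords 0 [] (by simp) (by simp)
  simpa using this

-- facts about lower_map: every key is the lowercase of its value, keys (hence values) are distinct
lemma lowerMap_items_lower : ∀ (tp : List String) (d : PySem.Dict String String),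
    (∀ e ∈ d.items, e.1 = PySem.Str.lower e.2) →
    ∀ e ∈ (tp.foldl (fun d p => d.insert (PySem.Str.lower p) p) d).items, e.1 = PySem.Str.lower e.2 := by
  intro tp
  induction tp with
  | nil => intro d h; simpa using h
  | cons p tp ih =>
    intro d h
    simp only [List.foldl_cons]
    apply ih
    intro e he
    rcases (PySem.Dict.mem_items_insert d (PySem.Str.lower p) p e).mp he with h1 | ⟨h2, _⟩
    · rw [h1]
    · exact h e h2

lemma lowerMap_snd_nodup (tp : List String) :
    ((pvLowerMap tp).items.map Prod.snd).Nodup := by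
  have hkeys : (pvLowerMap tp).keys.Nodup :=
    PySem.Dict.nodup_keys_foldl_insert_key tp PySem.Str.lower (fun _ p => p) PySem.Dict.empty
      PySem.Dict.nodup_keys_empty
  have hfst : ((pvLowerMap tp).items.map Prod.fst).Nodup := by
    simpa [PySem.Dict.keys] using hkeys
  have hlow : ∀ e ∈ (pvLowerMap tp).items, e.1 = PySem.Str.lower e.2 :=
    lowerMap_items_lower tp PySem.Dict.empty (by intro e he; simp [PySem.Dict.empty] at he)
  have hmap : (pvLowerMap tp).items.map Prod.fst
      = ((pvLowerMap tp).items.map Prod.snd).map PySem.Str.lower := by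
    rw [List.map_map]
    exact List.map_congr_left hlow
  rw [hmap] at hfst
  exact hfst.of_map _

theorem select_candidate_files_eq (tp : List String) (m : Int) :
    select_candidate_files tp m = select_candidate_files_alt tp m := by
  have hsnd := lowerMap_snd_nodup tp
  unfold select_candidate_files select_candidate_files_alt
  rw [aOuter_eq, dOut_eq_bBuckets _ hsnd]
  rw [bExtra_eq]
  simp only [List.append_nil, List.nil_append]
  rw [bCap_eq_capS, capS_append]
  cases h : capS m [] ((bBuckets (pvLowerMap tp).items).flatten) with
  | inl r => rfl
  | inr s =>
    have hs := capS_inr m _ [] s h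
    simp only [List.nil_append] at hs
    subst hs
    dsimp only
    rw [aPhase2_eq, bCap_eq_capS]

-- ===== VERDICT (by name: the statement is the Claim_ definition above) =====
theorem select_candidate_files_spec : Claim_equal_select_candidate_files := by
  intro tree_paths max_files _
  unfold Spec_select_candidate_files
  exact select_candidate_files_eq tree_paths max_files
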